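-- pv_equiv track=rewrite | github.com/ryantam626/string-splitter | implementation/python_native.py | _helper
-- ===== SOURCE A (Python) =====
-- import string
-- from typing import Iterator
--
-- non_word_boundaries = set(string.digits + string.ascii_letters + '_')
--
-- def _helper(sentence: str) -> Iterator[str]:
--     word = ''
--     for c in sentence:
--         if c in non_word_boundaries:
--             word += c
--         else:
--             if word:  # to avoid adding empty strings
--                 yield word
--                 word = ''
--             yield c
--     if word:  # check if there is a word that we haven't added yet
--         yield word
-- ===== SOURCE B (Python) =====
-- import string
--
-- non_word_boundaries = set(string.digits + string.ascii_letters + '_')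
--
-- def _helper(sentence: str):
--     # Pass 1: record the positions of all boundary characters.
--     # Pass 2: emit the non-empty slice between consecutive boundaries, then the boundary char.
--     n = len(sentence)
--     cuts = [i for i, c in enumerate(sentence) if c not in non_word_boundaries]
--     start = 0
--     for q in cuts + [n]:
--         if start < q:
--             yield sentence[start:q]
--         if q < n:
--             yield sentence[q]
--         start = q + 1
-- ===== Notes on version B (the rewrite author's own statement) =====
-- stated objective: alternative
-- what changed: B is a two-stage algorithm: it first computes the list of boundary-character positions, then emits the slices lying between consecutive boundaries plus each boundary character, instead of one pass accumulating and flushing a mutable word buffer.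
import Mathlib
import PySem

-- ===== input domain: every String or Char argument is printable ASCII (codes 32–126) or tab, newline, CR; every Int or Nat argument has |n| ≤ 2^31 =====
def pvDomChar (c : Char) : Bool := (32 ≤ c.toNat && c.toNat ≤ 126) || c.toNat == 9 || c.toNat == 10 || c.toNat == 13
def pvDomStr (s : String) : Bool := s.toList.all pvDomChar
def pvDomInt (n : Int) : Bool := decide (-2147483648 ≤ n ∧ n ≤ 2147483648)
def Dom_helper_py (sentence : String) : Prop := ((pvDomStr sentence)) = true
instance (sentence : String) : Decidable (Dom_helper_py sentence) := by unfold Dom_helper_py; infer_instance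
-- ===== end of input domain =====

-- B replaces A's one-pass mutable word-buffer loop with a two-stage algorithm: first list all
-- boundary-character positions, then emit the slices between consecutive boundaries and the
-- boundary characters themselves (alternative decomposition; same cost).


-- module constant: non_word_boundaries = set(string.digits + string.ascii_letters + '_')
def nwb (c : Char) : Bool :=
  ('0' ≤ c && c ≤ '9') || ('a' ≤ c && c ≤ 'z') || ('A' ≤ c && c ≤ 'Z') || c == '_'

-- ===== PORT A =====
-- the loop body of A: accumulate into `word` (acc.2), flush on a boundary char
def stepA (acc : List String × List Char) (c : Char) : List String × List Char :=
  if nwb c then (acc.1, acc.2 ++ [c])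
  else if acc.2 = [] then (acc.1 ++ [String.mk [c]], [])
  else (acc.1 ++ [String.mk acc.2, String.mk [c]], [])

def helper_py (sentence : String) : List String :=
  let r := sentence.toList.foldl stepA ([], [])
  if r.2 = [] then r.1 else r.1 ++ [String.mk r.2]

-- ===== PORT B =====
-- loop body of B's second pass: state = (out, start); at each cut q, emit the slice
-- sentence[start:q] if non-empty, then sentence[q] if q < n (always in range here), set start = q+1.
-- sentence[start:q] with 0 ≤ start ≤ q is exactly (take q).drop start; sentence[q] with q < n is getD.
def stepB (l : List Char) (n : Nat) (acc : List String × Nat) (q : Nat) : List String × Nat :=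
  let out := if acc.2 < q then acc.1 ++ [String.mk ((l.take q).drop acc.2)] else acc.1
  let out := if q < n then out ++ [String.mk [l.getD q ' ']] else out
  (out, q + 1)

def helper_py_alt (sentence : String) : List String :=
  let l := sentence.toList
  let n := l.length
  -- cuts = [i for i, c in enumerate(sentence) if c not in non_word_boundaries]
  let cuts := (List.range n).filter (fun i => !nwb (l.getD i ' '))
  ((cuts ++ [n]).foldl (stepB l n) ([], 0)).1

-- ===== PRECONDITION & SPEC =====
def Spec_helper_py (sentence : String) (out : List String) : Prop := out = helper_py_alt sentence
instance (sentence : String) (out : List String) : Decidable (Spec_helper_py sentence out) := by unfold Spec_helper_py; infer_instance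

-- ===== CLAIM (what is proved, stated in full; the proofs are below) =====
def Claim_equal_helper_py : Prop := ∀ (sentence : String), Dom_helper_py sentence → Spec_helper_py sentence (helper_py sentence)

-- ===== LEMMAS AND PROOFS =====

-- reference semantics: the remaining output of A's loop given buffer `word` and remaining input
def emit (word : List Char) : List Char → List String
  | [] => if word = [] then [] else [String.mk word]
  | c :: cs =>
    if nwb c then emit (word ++ [c]) cs
    else if word = [] then String.mk [c] :: emit [] cs
    else String.mk word :: String.mk [c] :: emit [] cs

def finishA (r : List String × List Char) : List String :=
  if r.2 = [] then r.1 else r.1 ++ [String.mk r.2]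

lemma foldA (cs : List Char) : ∀ out word,
    finishA (cs.foldl stepA (out, word)) = out ++ emit word cs := by
  induction cs with
  | nil => intro out word; by_cases h : word = [] <;> simp [finishA, emit, h]
  | cons c cs ih =>
    intro out word
    by_cases hc : nwb c
    · simp [stepA, hc, emit, ih]
    · by_cases hw : word = [] <;> simp [stepA, hc, hw, emit, ih]

lemma emit_word_run (g : List Char) : ∀ w rest, (∀ d ∈ g, nwb d = true) →
    emit w (g ++ rest) = emit (w ++ g) rest := by
  induction g with
  | nil => simp
  | cons d g ih =>
    intro w rest h
    have hd : nwb d = true := h d (by simp)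
    simp only [List.cons_append, emit, hd, if_pos]
    rw [ih (w ++ [d]) rest (fun x hx => h x (by simp [hx]))]
    simp

-- cuts of the list itself
def cutsOf (l : List Char) : List Nat :=
  (List.range l.length).filter (fun i => !nwb (l.getD i ' '))

lemma cutsOf_cons (c : Char) (cs : List Char) :
    cutsOf (c :: cs) = (if nwb c then [] else [0]) ++ (cutsOf cs).map Nat.succ := by
  unfold cutsOf
  rw [show (c :: cs).length = cs.length + 1 from rfl, List.range_succ_eq_map,
    List.filter_cons, List.filter_map]
  have h : List.filter ((fun i => !nwb ((c :: cs)[i]?.getD ' ')) ∘ Nat.succ) (List.range cs.length)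
      = List.filter (fun i => !nwb (cs[i]?.getD ' ')) (List.range cs.length) := by
    apply List.filter_congr; intro x _; simp
  by_cases hc : nwb c <;> simp [hc, h]

lemma cutsOf_word_run (w : List Char) : ∀ rest, (∀ d ∈ w, nwb d = true) →
    cutsOf (w ++ rest) = (cutsOf rest).map (· + w.length) := by
  induction w with
  | nil => intro rest _; simp [List.map_id']
  | cons a w ih =>
    intro rest h
    have ha : nwb a = true := h a (by simp)
    rw [List.cons_append, cutsOf_cons, ih rest (fun x hx => h x (by simp [hx])), ha]
    simp only [if_pos, List.nil_append, List.map_map]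
    apply List.map_congr_left
    intro x _
    simp [Function.comp]; omega

-- the invariant of B's fold: with position start into l and tail = l.drop start,
-- folding over the shifted cuts of tail (plus the final l.length) appends emit [] tail.
lemma foldB_main : ∀ fuel tail (l : List Char) start out, tail.length ≤ fuel →
    l.drop start = tail → start ≤ l.length →
    (((cutsOf tail).map (· + start) ++ [l.length]).foldl (stepB l l.length) (out, start)).1
      = out ++ emit [] tail := by
  intro fuel
  induction fuel with
  | zero =>
    intro tail l start out hf hdrop hle
    have htn : tail = [] := by cases tail <;> simp_all
    subst htn
    have hlen := congrArg List.length hdrop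
    simp only [List.length_drop, List.length_nil] at hlen
    have hs : start = l.length := by omega
    simp [cutsOf, stepB, emit, hs]
  | succ fuel ih =>
    intro tail l start out hf hdrop hle
    have hlen' := congrArg List.length hdrop
    simp only [List.length_drop] at hlen'
    cases htail : tail with
    | nil =>
      subst htail
      have hs : start = l.length := by simp at hlen'; omega
      simp [cutsOf, stepB, emit, hs]
    | cons c cs =>
      subst htail
      have hlen : l.length = start + cs.length + 1 := by simp at hlen'; omega
      have hf' : cs.length ≤ fuel := by simp at hf; omega
      by_cases hc : nwb c
      · -- word run: split tail = w ++ rest, w = takeWhile nwb, nonempty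
        set w := (c :: cs).takeWhile nwb with hw
        set rest := (c :: cs).dropWhile nwb with hrest
        have hsplit : w ++ rest = c :: cs := List.takeWhile_append_dropWhile
        have hwmem : ∀ d ∈ w, nwb d = true := fun d hd => List.mem_takeWhile_imp hd
        have hwne : w = c :: cs.takeWhile nwb := by rw [hw]; simp [hc]
        have hwlen : 1 ≤ w.length := by rw [hwne]; simp
        have hcuts : cutsOf (c :: cs) = (cutsOf rest).map (· + w.length) := by
          rw [← hsplit, cutsOf_word_run w rest hwmem]
        have hslice : ∀ q, (l.take (start + q)).drop start = (c :: cs).take q := by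
          intro q
          rw [List.drop_take, hdrop]
          congr 1; omega
        have hrestdrop : l.drop (start + w.length) = rest := by
          rw [← List.drop_drop, hdrop, ← hsplit]; simp
        have hemit : emit [] (c :: cs) = emit w rest := by
          rw [← hsplit, emit_word_run w [] rest hwmem, List.nil_append]
        have hwtake : (c :: cs).take w.length = w := by
          conv_lhs => rw [← hsplit]
          simp
        have hlsum : (c :: cs).length = w.length + rest.length := by
          rw [← hsplit]; simp
        cases hr : rest with
        | nil =>
          -- no more boundaries: the final cut n emits the whole word
          rw [hcuts, hr]
          have hslen : start + w.length = l.length := by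
            rw [hr] at hlsum; simp at hlsum; omega
          simp only [cutsOf, List.length_nil, List.range_zero, List.filter_nil,
            List.map_nil, List.nil_append, List.foldl_cons, List.foldl_nil]
          simp only [stepB, ← hslen, Nat.lt_add_right_iff_pos, if_pos (by omega : 0 < w.length)]
          rw [hslice w.length, hwtake, hemit, hr]
          simp [emit, show w ≠ [] from by rw [hwne]; simp]
        | cons d ds =>
          have hd : nwb d = false := by
            have := List.head?_dropWhile_not nwb (c :: cs)
            rw [← hrest, hr] at this; simpa using this
          rw [hcuts, hr, cutsOf_cons, hd]
          simp only [Bool.false_eq_true, if_false, List.nil_append, List.map_cons,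
            List.map_map, List.cons_append, List.foldl_cons]
          have hq : start + w.length < l.length := by
            rw [hr] at hlsum; simp at hlsum; omega
          have hgd : l.getD (0 + w.length + start) ' ' = d := by
            rw [show (0 + w.length + start) = start + w.length from by omega,
              List.getD, ← List.getElem?_drop, hdrop, ← hsplit, hr]
            simp
          have hstep : stepB l l.length (out, start) (0 + w.length + start)
              = (out ++ [String.mk w, String.mk [d]], start + w.length + 1) := by
            simp only [stepB, hgd]
            rw [show (0 + w.length + start) = start + w.length from by omega,
              if_pos (by omega : start < start + w.length), hslice w.length, hwtake,
              if_pos hq]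
            simp
          rw [hstep]
          have hmap : (cutsOf ds).map ((fun x => x + start) ∘ (fun x => x + w.length) ∘ Nat.succ)
              = (cutsOf ds).map (· + (start + w.length + 1)) := by
            apply List.map_congr_left; intro x _; simp [Function.comp]; omega
          have hdrop2 : l.drop (start + w.length + 1) = ds := by
            rw [← List.drop_drop, hrestdrop, hr]; rfl
          have hfd : ds.length ≤ fuel := by
            rw [hr] at hlsum; simp at hlsum; omega
          rw [hmap, ih ds l (start + w.length + 1) _ hfd hdrop2 (by omega)]
          rw [hemit, hr]
          simp [emit, hd, show w ≠ [] from by rw [hwne]; simp]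
      · -- boundary char at start
        have hc' : nwb c = false := by simpa using hc
        have hn : start < l.length := by omega
        rw [cutsOf_cons, hc']
        simp only [Bool.false_eq_true, if_false, List.nil_append, List.map_cons,
          List.map_map, List.cons_append, List.foldl_cons]
        have hgd : l.getD (0 + start) ' ' = c := by
          rw [show 0 + start = start + 0 from by omega, List.getD, ← List.getElem?_drop, hdrop]
          rfl
        have hstep : stepB l l.length (out, start) (0 + start)
            = (out ++ [String.mk [c]], 0 + start + 1) := by
          simp only [stepB, hgd]
          rw [if_neg (by omega : ¬ start < 0 + start), if_pos (by omega : 0 + start < l.length)]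
        rw [hstep]
        have hmap : (cutsOf cs).map ((fun x => x + start) ∘ Nat.succ)
            = (cutsOf cs).map (· + (start + 1)) := by
          apply List.map_congr_left; intro x _; simp [Function.comp]; omega
        have hdrop2 : l.drop (start + 1) = cs := by
          rw [← List.drop_drop, hdrop]; rfl
        rw [show (0 + start + 1) = start + 1 from by omega, hmap,
          ih cs l (start + 1) _ hf' hdrop2 (by omega)]
        simp [emit, hc']

-- ===== VERDICT (by name: the statement is the Claim_ definition above) =====
theorem helper_py_spec : Claim_equal_helper_py := by
  intro s _
  unfold Spec_helper_py helper_py helper_py_alt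
  have hB := foldB_main s.toList.length s.toList s.toList 0 [] le_rfl (by simp) (by simp)
  have hcuts : (cutsOf s.toList).map (· + 0) = cutsOf s.toList := by simp
  rw [hcuts] at hB
  show finishA (s.toList.foldl stepA ([], [])) = _
  rw [foldA s.toList [] []]
  simpa [cutsOf] using hB.symm
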